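-- pv_equiv track=rewrite | github.com/mtgericke/MOLLER-IntElec-ProtoSoft | PythonSoft/moller/util.py | find_mid_of_longest_run
-- ===== SOURCE A (Python) =====
-- import math
--
-- def find_mid_of_longest_run(arr: list, value: int) -> int:
--     """ Find the midpoint of a the longest run of values
--
--     Used in MOLLER to get the longest 'good' spot in the ADC delay value setting range
--
--     Args:
--         arr (list): List of values to run through
--
--         value (int): Value to use as 'good' (typically 1 or 0)
--
--     Returns:
--         (int) Midpoint of longest 'good' run
--     """
--     cur = 0
--
--     run = 0
--     pos = 0
--     max_pos = 0
--     max_run = 0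
--
--     while(True):
--         if arr[cur] == value:
--             if run == 0:
--                 pos = cur
--             run = run + 1
--         else:
--             if max_run < run:
--                 max_pos = pos
--                 max_run = run
--             run = 0
--
--
--         cur = cur + 1
--
--         # Its over, and last value was not part of run
--         if cur == len(arr):
--             if max_run < run:
--                 max_run = run
--                 max_pos = pos
--             break
--
--     return max_pos + math.floor(max_run / 2)
-- ===== SOURCE B (Python) =====
-- def find_mid_of_longest_run(arr: list, value: int) -> int:
--     """Midpoint of the longest (earliest) run of `value` in arr.
--
--     Two-pointer run scan: jump run by run instead of A's per-element
--     state machine.  Returns 0 on an empty list (where A raises IndexError).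
--     """
--     best_pos = 0
--     best_len = 0
--     n = len(arr)
--     i = 0
--     while i < n:
--         j = i
--         while j < n and arr[j] == arr[i]:
--             j += 1
--         if arr[i] == value and j - i > best_len:
--             best_pos = i
--             best_len = j - i
--         i = j
--     return best_pos + best_len // 2
-- ===== Notes on version B (the rewrite author's own statement) =====
-- stated objective: alternative
-- what changed: Replaces A's per-element run/pos/max state machine with a two-pointer scan that jumps run by run, keeping only (best_pos, best_len); Pre_ excludes the empty list, where A raises IndexError.
import Mathlib
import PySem

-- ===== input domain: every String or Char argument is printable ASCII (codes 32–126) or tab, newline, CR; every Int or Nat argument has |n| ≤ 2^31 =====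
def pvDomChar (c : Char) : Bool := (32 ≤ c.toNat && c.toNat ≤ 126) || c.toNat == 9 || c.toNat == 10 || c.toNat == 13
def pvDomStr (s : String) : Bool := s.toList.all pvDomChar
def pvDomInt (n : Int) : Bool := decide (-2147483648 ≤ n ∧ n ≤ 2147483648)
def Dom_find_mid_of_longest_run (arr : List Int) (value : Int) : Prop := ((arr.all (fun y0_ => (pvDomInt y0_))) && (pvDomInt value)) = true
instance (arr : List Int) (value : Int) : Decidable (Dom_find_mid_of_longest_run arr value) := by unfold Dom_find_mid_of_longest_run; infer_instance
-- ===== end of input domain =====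

-- B replaces A's per-element run state machine by a two-pointer run-by-run scan (objective: alternative);
-- A raises IndexError on the empty list, which Pre_ excludes (B's own algorithm returns 0 there).

-- ===== PORT A =====
-- A's while-True loop, fueled by the number of elements left; the Python breaks
-- exactly when cur reaches len(arr), which is the fuel-0 base case here
-- (the final `if max_run < run` check of the break block is that base case).
def pvGoA (arr : List Int) (value : Int) : Nat → Nat → Int → Int → Int → Int → Int
  | 0, _cur, run, pos, max_pos, max_run =>
      if max_run < run then pos + PySem.Int.floordiv run 2
      else max_pos + PySem.Int.floordiv max_run 2
  | fuel+1, cur, run, pos, max_pos, max_run =>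
      if arr.getD cur 0 = value then
        -- arr[cur] == value branch: pos set when run == 0, run incremented
        pvGoA arr value fuel (cur+1) (run+1) (if run = 0 then (cur : Int) else pos) max_pos max_run
      else
        -- else branch: possibly promote (pos, run) to (max_pos, max_run), reset run
        pvGoA arr value fuel (cur+1) 0 pos
          (if max_run < run then pos else max_pos) (if max_run < run then run else max_run)

def find_mid_of_longest_run (arr : List Int) (value : Int) : Int :=
  pvGoA arr value arr.length 0 0 0 0 0

-- ===== PORT B =====
-- inner while of Source B: advance j while j < n and arr[j] == arr[i]
def pvRunEnd (arr : List Int) (x : Int) : Nat → Nat → Nat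
  | 0, j => j
  | fuel+1, j => if j < arr.length ∧ arr.getD j 0 = x then pvRunEnd arr x fuel (j+1) else j

-- outer while of Source B, fueled by the number of elements left (each group consumes ≥ 1)
def pvGoB (arr : List Int) (value : Int) : Nat → Nat → Int → Int → Int
  | 0, _i, best_pos, best_len => best_pos + PySem.Int.floordiv best_len 2
  | fuel+1, i, best_pos, best_len =>
      if i < arr.length then
        let j := pvRunEnd arr (arr.getD i 0) (arr.length - i) i
        if arr.getD i 0 = value ∧ ((j : Int) - (i : Int)) > best_len then
          pvGoB arr value fuel j (i : Int) ((j : Int) - (i : Int))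
        else
          pvGoB arr value fuel j best_pos best_len
      else best_pos + PySem.Int.floordiv best_len 2

def find_mid_of_longest_run_alt (arr : List Int) (value : Int) : Int :=
  pvGoB arr value arr.length 0 0 0

-- ===== PRECONDITION & SPEC =====
-- A evaluates arr[0] before any exit condition, so it raises IndexError on the empty list.
def Pre_find_mid_of_longest_run (arr : List Int) (value : Int) : Prop := arr ≠ []
instance (arr : List Int) (value : Int) : Decidable (Pre_find_mid_of_longest_run arr value) := by
  unfold Pre_find_mid_of_longest_run; infer_instance
def pvWitness_find_mid_of_longest_run : List Int × Int := ([1, 1, 0, 1], 1)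

def Spec_find_mid_of_longest_run (arr : List Int) (value : Int) (out : Int) : Prop :=
  out = find_mid_of_longest_run_alt arr value
instance (arr : List Int) (value : Int) (out : Int) : Decidable (Spec_find_mid_of_longest_run arr value out) := by
  unfold Spec_find_mid_of_longest_run; infer_instance

-- ===== CLAIM (what is proved, stated in full; the proofs are below) =====
def Claim_equal_find_mid_of_longest_run : Prop := ∀ (arr : List Int) (value : Int), Dom_find_mid_of_longest_run arr value → Pre_find_mid_of_longest_run arr value → Spec_find_mid_of_longest_run arr value (find_mid_of_longest_run arr value)

-- ===== LEMMAS AND PROOFS =====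

-- properties of the inner run scan
theorem pvRunEnd_ge (arr : List Int) (x : Int) : ∀ fuel j, j ≤ pvRunEnd arr x fuel j := by
  intro fuel
  induction fuel with
  | zero => intro j; simp [pvRunEnd]
  | succ f ih =>
      intro j
      simp only [pvRunEnd]
      split
      · exact le_trans (Nat.le_succ j) (ih (j+1))
      · exact le_refl j

theorem pvRunEnd_le (arr : List Int) (x : Int) : ∀ fuel j, j ≤ arr.length →
    pvRunEnd arr x fuel j ≤ arr.length := by
  intro fuel
  induction fuel with
  | zero => intro j h; simpa [pvRunEnd] using h
  | succ f ih =>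
      intro j h
      simp only [pvRunEnd]
      split
      · rename_i hc; exact ih (j+1) hc.1
      · exact h

theorem pvRunEnd_mem (arr : List Int) (x : Int) : ∀ fuel j k, j ≤ k →
    k < pvRunEnd arr x fuel j → arr.getD k 0 = x := by
  intro fuel
  induction fuel with
  | zero => intro j k h1 h2; simp [pvRunEnd] at h2; omega
  | succ f ih =>
      intro j k h1 h2
      simp only [pvRunEnd] at h2
      split at h2
      · rename_i hc
        rcases Nat.eq_or_lt_of_le h1 with rfl | hlt
        · exact hc.2
        · exact ih (j+1) k hlt h2
      · omega

theorem pvRunEnd_stop (arr : List Int) (x : Int) : ∀ fuel j,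
    arr.length - j ≤ fuel →
    pvRunEnd arr x fuel j < arr.length → arr.getD (pvRunEnd arr x fuel j) 0 ≠ x := by
  intro fuel
  induction fuel with
  | zero =>
      intro j hf h
      exfalso
      simp only [pvRunEnd] at h
      omega
  | succ f ih =>
      intro j hf h
      by_cases hc : j < arr.length ∧ arr.getD j 0 = x
      · rw [pvRunEnd, if_pos hc] at h ⊢
        exact ih (j+1) (by omega) h
      · rw [pvRunEnd, if_neg hc] at h ⊢
        intro hx
        exact hc ⟨h, hx⟩

theorem pvRunEnd_gt (arr : List Int) (i : Nat) (fuel : Nat) (h : i < arr.length) (hf : 1 ≤ fuel) :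
    i < pvRunEnd arr (arr.getD i 0) fuel i := by
  cases fuel with
  | zero => omega
  | succ f =>
      rw [pvRunEnd, if_pos (show i < arr.length ∧ arr.getD i 0 = arr.getD i 0 from ⟨h, rfl⟩)]
      have := pvRunEnd_ge arr (arr.getD i 0) f (i+1)
      omega

-- fuel irrelevance of goB (enough fuel ⇒ result independent of the amount)
theorem pvGoB_fuel (arr : List Int) (value : Int) : ∀ f f' i bp bl,
    arr.length - i ≤ f → arr.length - i ≤ f' →
    pvGoB arr value f i bp bl = pvGoB arr value f' i bp bl := by
  intro f
  induction f with
  | zero =>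
      intro f' i bp bl hf hf'
      have hi : arr.length ≤ i := by omega
      cases f' with
      | zero => rfl
      | succ g => simp [pvGoB, Nat.not_lt.mpr hi]
  | succ f ih =>
      intro f' i bp bl hf hf'
      cases f' with
      | zero =>
          have hi : arr.length ≤ i := by omega
          simp [pvGoB, Nat.not_lt.mpr hi]
      | succ g =>
          simp only [pvGoB]
          by_cases hi : i < arr.length
          · simp only [if_pos hi]
            have hj1 : i < pvRunEnd arr (arr.getD i 0) (arr.length - i) i :=
              pvRunEnd_gt arr i (arr.length - i) hi (by omega)
            split
            · exact ih g _ _ _ (by omega) (by omega)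
            · exact ih g _ _ _ (by omega) (by omega)
          · simp [if_neg hi]

-- A's loop passes over a block of non-value elements without changing its state (run = 0, 0 ≤ max_run)
theorem pvGoA_skip (arr : List Int) (value : Int) : ∀ d c p mp mr,
    c + d ≤ arr.length → 0 ≤ mr →
    (∀ k, c ≤ k → k < c + d → arr.getD k 0 ≠ value) →
    pvGoA arr value (arr.length - c) c 0 p mp mr
      = pvGoA arr value (arr.length - (c + d)) (c + d) 0 p mp mr := by
  intro d
  induction d with
  | zero => intro c p mp mr h hmr hk; simp
  | succ d ih =>
      intro c p mp mr h hmr hk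
      have hcl : c < arr.length := by omega
      have hfs : arr.length - c = (arr.length - (c+1)) + 1 := by omega
      rw [hfs]
      rw [pvGoA, if_neg (hk c (le_refl c) (by omega))]
      have hnr : ¬ mr < (0:Int) := by omega
      rw [if_neg hnr, if_neg hnr]
      have := ih (c+1) p mp mr (by omega) hmr (fun k h1 h2 => hk k (by omega) (by omega))
      rw [this]
      congr 1 <;> omega

-- A's loop walks through a run of value elements [s, e), accumulating run = cur - s, pos = s
theorem pvGoA_run (arr : List Int) (value : Int) : ∀ d s cur e mp mr,
    cur + d = e → s < cur → e ≤ arr.length →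
    (∀ k, s ≤ k → k < e → arr.getD k 0 = value) →
    pvGoA arr value (arr.length - cur) cur ((cur:Int) - s) s mp mr
      = pvGoA arr value (arr.length - e) e ((e:Int) - s) s mp mr := by
  intro d
  induction d with
  | zero => intro s cur e mp mr h hs he hk; subst h; simp
  | succ d ih =>
      intro s cur e mp mr h hs he hk
      have hcl : cur < arr.length := by omega
      have hfs : arr.length - cur = (arr.length - (cur+1)) + 1 := by omega
      rw [hfs]
      rw [pvGoA, if_pos (hk cur (by omega) (by omega))]
      have hrz : ¬ ((cur:Int) - s = 0) := by intro hz; omega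
      rw [if_neg hrz]
      have hcast : ((cur:Int) - s) + 1 = ((cur+1 : Nat) : Int) - s := by push_cast; ring
      rw [hcast]
      exact ih s (cur+1) e mp mr (by omega) (by omega) he hk

-- main simulation: from any position i with run = 0, A's state machine and B's run scan agree
theorem pvMain (arr : List Int) (value : Int) : ∀ fuel i p mp mr,
    i ≤ arr.length → arr.length - i ≤ fuel → 0 ≤ mr →
    pvGoA arr value (arr.length - i) i 0 p mp mr = pvGoB arr value (arr.length - i) i mp mr := by
  intro fuel
  induction fuel with
  | zero =>
      intro i p mp mr hi hf hmr
      have h0 : arr.length - i = 0 := by omega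
      rw [h0]
      simp only [pvGoA, pvGoB]
      rw [if_neg (by omega : ¬ mr < (0:Int))]
  | succ f ih =>
      intro i p mp mr hi hf hmr
      by_cases hil : i < arr.length
      · set x := arr.getD i 0 with hx
        set e := pvRunEnd arr x (arr.length - i) i with he
        have hie : i < e := pvRunEnd_gt arr i (arr.length - i) hil (by omega)
        have hel : e ≤ arr.length := pvRunEnd_le arr x (arr.length - i) i (by omega)
        have hmem : ∀ k, i ≤ k → k < e → arr.getD k 0 = x :=
          fun k h1 h2 => pvRunEnd_mem arr x (arr.length - i) i k h1 h2
        have hstop : e < arr.length → arr.getD e 0 ≠ x :=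
          fun hlt => pvRunEnd_stop arr x (arr.length - i) i (le_refl _) hlt
        have hfsB : arr.length - i = (arr.length - i - 1) + 1 := by omega
        by_cases hxv : x = value
        · -- run of `value` from i to e
          have hiv : arr.getD i 0 = value := by rw [← hx]; exact hxv
          have stepA : pvGoA arr value (arr.length - i) i 0 p mp mr
              = pvGoA arr value (arr.length - (i+1)) (i+1) 1 (i:Int) mp mr := by
            have hfsA : arr.length - i = (arr.length - (i+1)) + 1 := by omega
            rw [hfsA, pvGoA, if_pos hiv, if_pos rfl]
            norm_num
          have runA : pvGoA arr value (arr.length - (i+1)) (i+1) 1 (i:Int) mp mr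
              = pvGoA arr value (arr.length - e) e ((e:Int) - i) i mp mr := by
            have hone : (1:Int) = ((i+1 : Nat) : Int) - (i:Nat) := by push_cast; ring
            rw [hone]
            exact pvGoA_run arr value (e - (i+1)) i (i+1) e mp mr (by omega) (by omega) hel
              (fun k h1 h2 => by rw [hmem k h1 h2, hxv])
          have stepB : pvGoB arr value (arr.length - i) i mp mr
              = (if x = value ∧ ((e:Int) - (i:Int)) > mr
                 then pvGoB arr value (arr.length - i - 1) e (i:Int) ((e:Int) - i)
                 else pvGoB arr value (arr.length - i - 1) e mp mr) := by
            conv_lhs => rw [hfsB]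
            simp only [pvGoB, if_pos hil, ← he, ← hx]
          rw [stepA, runA, stepB]
          by_cases hend : e = arr.length
          · -- the run reaches the end of the array
            rw [hend, Nat.sub_self]
            simp only [pvGoA]
            by_cases hgt : mr < (arr.length : Int) - i
            · rw [if_pos hgt, if_pos ⟨hxv, hgt⟩]
              rw [pvGoB_fuel arr value (arr.length - i - 1) 0 arr.length _ _ (by omega) (by omega)]
              simp [pvGoB]
            · rw [if_neg hgt, if_neg (fun hc => hgt hc.2)]
              rw [pvGoB_fuel arr value (arr.length - i - 1) 0 arr.length _ _ (by omega) (by omega)]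
              simp [pvGoB]
          · -- the run ends at e < len: A takes the else branch at e, then skips the non-value group
            have helt : e < arr.length := by omega
            have hnev : arr.getD e 0 ≠ value := by rw [← hxv]; exact hstop helt
            have hfsE : arr.length - e = (arr.length - (e+1)) + 1 := by omega
            set e2 := pvRunEnd arr (arr.getD e 0) (arr.length - e) e with he2
            have hee2 : e < e2 := pvRunEnd_gt arr e (arr.length - e) helt (by omega)
            have he2l : e2 ≤ arr.length := pvRunEnd_le arr _ (arr.length - e) e (by omega)
            have hmem2 : ∀ k, e ≤ k → k < e2 → arr.getD k 0 = arr.getD e 0 :=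
              fun k h1 h2 => pvRunEnd_mem arr _ (arr.length - e) e k h1 h2
            have stepA2 : pvGoA arr value (arr.length - e) e ((e:Int) - i) i mp mr
                = pvGoA arr value (arr.length - (e+1)) (e+1) 0 i
                    (if mr < (e:Int) - i then (i:Int) else mp)
                    (if mr < (e:Int) - i then (e:Int) - i else mr) := by
              conv_lhs => rw [hfsE]
              rw [pvGoA, if_neg hnev]
            set mp' := if mr < (e:Int) - i then (i:Int) else mp with hmp'
            set mr' := if mr < (e:Int) - i then (e:Int) - i else mr with hmr'
            have hmr'0 : 0 ≤ mr' := by rw [hmr']; split <;> omega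
            have skipA : pvGoA arr value (arr.length - (e+1)) (e+1) 0 i mp' mr'
                = pvGoA arr value (arr.length - e2) e2 0 i mp' mr' := by
              have hsk := pvGoA_skip arr value (e2 - (e+1)) (e+1) i mp' mr' (by omega) hmr'0
                (fun k h1 h2 => by
                  rw [hmem2 k (by omega) (by omega)]
                  exact hnev)
              rwa [show e + 1 + (e2 - (e+1)) = e2 by omega] at hsk
            rw [stepA2, skipA]
            have stepB2 : ∀ bp bl, pvGoB arr value (arr.length - i - 1) e bp bl
                = pvGoB arr value (arr.length - e2) e2 bp bl := by
              intro bp bl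
              rw [pvGoB_fuel arr value (arr.length - i - 1) (arr.length - e) e bp bl (by omega) (by omega)]
              conv_lhs => rw [hfsE]
              simp only [pvGoB, if_pos helt, ← he2]
              rw [if_neg (fun hc => hnev hc.1)]
              exact pvGoB_fuel arr value (arr.length - (e+1)) (arr.length - e2) e2 bp bl (by omega) (by omega)
            have ihe2 := ih e2 i mp' mr' he2l (by omega) hmr'0
            by_cases hgt : mr < (e:Int) - i
            · rw [if_pos ⟨hxv, by omega⟩, stepB2]
              have hpair : mp' = (i:Int) ∧ mr' = (e:Int) - i := by
                rw [hmp', hmr', if_pos hgt, if_pos hgt]; exact ⟨rfl, rfl⟩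
              rw [hpair.1, hpair.2] at ihe2 ⊢
              exact ihe2
            · rw [if_neg (fun hc => hgt hc.2), stepB2]
              have hpair : mp' = mp ∧ mr' = mr := by
                rw [hmp', hmr', if_neg hgt, if_neg hgt]; exact ⟨rfl, rfl⟩
              rw [hpair.1, hpair.2] at ihe2 ⊢
              exact ihe2
        · -- non-value group: A passes over it unchanged, B jumps over it with no update
          have hnv : ∀ k, i ≤ k → k < e → arr.getD k 0 ≠ value :=
            fun k h1 h2 => by rw [hmem k h1 h2]; exact hxv
          have skipA : pvGoA arr value (arr.length - i) i 0 p mp mr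
              = pvGoA arr value (arr.length - e) e 0 p mp mr := by
            have hsk := pvGoA_skip arr value (e - i) i p mp mr (by omega) hmr
              (fun k h1 h2 => hnv k h1 (by omega))
            rwa [show i + (e - i) = e by omega] at hsk
          have stepB : pvGoB arr value (arr.length - i) i mp mr
              = pvGoB arr value (arr.length - i - 1) e mp mr := by
            conv_lhs => rw [hfsB]
            simp only [pvGoB, if_pos hil, ← he, ← hx]
            rw [if_neg (fun hc => hxv hc.1)]
          rw [skipA, stepB]
          rw [pvGoB_fuel arr value (arr.length - i - 1) (arr.length - e) e mp mr (by omega) (by omega)]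
          exact ih e p mp mr hel (by omega) hmr
      · have h0 : arr.length - i = 0 := by omega
        rw [h0]
        simp only [pvGoA, pvGoB]
        rw [if_neg (by omega : ¬ mr < (0:Int))]

-- ===== VERDICT (by name: the statement is the Claim_ definition above) =====
theorem find_mid_of_longest_run_spec : Claim_equal_find_mid_of_longest_run := by
  intro arr value _ _
  unfold Spec_find_mid_of_longest_run find_mid_of_longest_run find_mid_of_longest_run_alt
  have := pvMain arr value arr.length 0 0 0 0 (by omega) (by omega) (by omega)
  simpa using this
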